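-- pv_equiv track=rewrite | github.com/Alpha-778/CodeForces-solution-in-Python | 1560A Dislike of Threes.py | generate_liked_numbers
-- ===== SOURCE A (Python) =====
-- def generate_liked_numbers(limit):
--     liked = []
--     num = 1
--     while len(liked) < limit:
--         if num % 3 != 0 and num % 10 != 3:
--             liked.append(num)
--         num += 1
--     return liked
-- ===== SOURCE B (Python) =====
-- OFFSETS = [1, 2, 4, 5, 7, 8, 10, 11, 14, 16, 17, 19, 20, 22, 25, 26, 28, 29]
--
-- def generate_liked_numbers(limit):
--     liked = []
--     b = 0
--     while len(liked) + 18 <= limit: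
--         base = 30 * b
--         liked.extend(base + off for off in OFFSETS)
--         b += 1
--     base = 30 * b
--     for off in OFFSETS:
--         if len(liked) < limit:
--             liked.append(base + off)
--     return liked
-- ===== Notes on version B (the rewrite author's own statement) =====
-- stated objective: faster
-- what changed: B exploits the period-30 structure: instead of testing every integer with two modulo operations, it appends whole precomputed 18-offset blocks (30*b + offset) per period, with only the final partial block guarded by the length check.
import Mathlib
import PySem

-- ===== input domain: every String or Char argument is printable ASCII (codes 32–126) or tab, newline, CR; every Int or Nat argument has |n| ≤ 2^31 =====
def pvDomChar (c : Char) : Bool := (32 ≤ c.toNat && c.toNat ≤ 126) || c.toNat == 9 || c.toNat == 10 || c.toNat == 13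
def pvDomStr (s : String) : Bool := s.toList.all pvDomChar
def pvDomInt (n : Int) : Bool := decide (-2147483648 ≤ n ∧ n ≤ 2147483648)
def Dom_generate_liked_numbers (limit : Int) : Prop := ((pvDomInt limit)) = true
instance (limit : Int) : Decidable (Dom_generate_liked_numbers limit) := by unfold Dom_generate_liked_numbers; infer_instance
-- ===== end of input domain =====

-- B replaces A's per-number modulo filtering by appending precomputed period-30 offset blocks (faster by a constant factor).

-- ===== PORT A =====
-- `num % 3 != 0 and num % 10 != 3` (Python % with positive divisor = Lean Int.emod)
def pvLiked (n : Int) : Bool := n % 3 != 0 && n % 10 != 3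

-- termination helper for A's while-loop: distance (≤ 2) to the next liked number
def pvGap (n : Int) : Nat := if pvLiked n then 0 else if pvLiked (n + 1) then 1 else 2

theorem pvGap_le (n : Int) : pvGap n ≤ 2 := by
  unfold pvGap; split_ifs <;> omega

-- among three consecutive integers, not all the first two can be disliked
theorem pvNo3 (n : Int) : pvLiked n = false → pvLiked (n + 1) = false → pvLiked (n + 2) = true := by
  simp only [pvLiked, Bool.and_eq_false_iff, Bool.and_eq_true, bne_eq_false_iff_eq, bne_iff_ne,
    ne_eq]
  omega

theorem pvGap_lt (n : Int) (h : pvLiked n = false) : pvGap (n + 1) < pvGap n := by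
  by_cases h1 : pvLiked (n + 1) = true
  · simp [pvGap, h, h1]
  · have h1' : pvLiked (n + 1) = false := by simpa using h1
    have h2 := pvNo3 n h h1'
    have h2' : pvLiked (n + 1 + 1) = true := by rw [show n + 1 + 1 = n + 2 by ring]; exact h2
    simp [pvGap, h, h1', h2']

-- A's while-loop, state (liked, num)
def aLoop (limit : Int) (liked : List Int) (num : Int) : List Int :=
  if (liked.length : Int) < limit then
    if pvLiked num then aLoop limit (liked ++ [num]) (num + 1)
    else aLoop limit liked (num + 1)
  else liked
termination_by 3 * (limit - liked.length).toNat + pvGap num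
decreasing_by
  · have hg := pvGap_le (num + 1)
    simp only [List.length_append, List.length_cons, List.length_nil]
    push_cast
    omega
  · have hlt := pvGap_lt num (by simpa using ‹¬ pvLiked num = true›)
    omega

def generate_liked_numbers (limit : Int) : List Int := aLoop limit [] 1

-- ===== PORT B =====
def pvOffsets : List Int := [1, 2, 4, 5, 7, 8, 10, 11, 14, 16, 17, 19, 20, 22, 25, 26, 28, 29]

-- the final partial block: `for off in OFFSETS: if len(liked) < limit: liked.append(base + off)`
def pvTail (limit : Int) (base : Int) (liked : List Int) : List Int :=
  pvOffsets.foldl (fun acc off => if (acc.length : Int) < limit then acc ++ [base + off] else acc) liked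

-- B's while-loop: extend by a whole block while a full block still fits
def bLoop (limit : Int) (liked : List Int) (b : Int) : List Int :=
  if (liked.length : Int) + 18 ≤ limit then
    bLoop limit (liked ++ pvOffsets.map (fun off => 30 * b + off)) (b + 1)
  else pvTail limit (30 * b) liked
termination_by (limit - liked.length).toNat
decreasing_by
  simp only [List.length_append, List.length_map]
  push_cast
  simp only [show pvOffsets.length = 18 from rfl]
  omega

def generate_liked_numbers_alt (limit : Int) : List Int := bLoop limit [] 0

-- ===== PRECONDITION & SPEC =====
def Spec_generate_liked_numbers (limit : Int) (out : List Int) : Prop := out = generate_liked_numbers_alt limit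
instance (limit : Int) (out : List Int) : Decidable (Spec_generate_liked_numbers limit out) := by unfold Spec_generate_liked_numbers; infer_instance

-- ===== CLAIM (what is proved, stated in full; the proofs are below) =====
def Claim_equal_generate_liked_numbers : Prop := ∀ (limit : Int), Dom_generate_liked_numbers limit → Spec_generate_liked_numbers limit (generate_liked_numbers limit)

-- ===== LEMMAS AND PROOFS =====

-- A's loop body as a single step, and a fold of it over a segment of candidate numbers
def aStep (limit : Int) (acc : List Int) (num : Int) : List Int :=
  if (acc.length : Int) < limit then (if pvLiked num then acc ++ [num] else acc) else acc

def aSeg (limit : Int) (nums : List Int) (liked : List Int) : List Int :=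
  nums.foldl (aStep limit) liked

-- B's guarded-append step and its fold
def bStep (limit : Int) (acc : List Int) (n : Int) : List Int :=
  if (acc.length : Int) < limit then acc ++ [n] else acc

def bFold (limit : Int) (nums : List Int) (liked : List Int) : List Int :=
  nums.foldl (bStep limit) liked

def segList (num : Int) (k : Nat) : List Int := (List.range k).map (fun (i : Nat) => num + (i : Int))

theorem aLoop_stop (limit : Int) (liked : List Int) (num : Int)
    (h : ¬ (liked.length : Int) < limit) : aLoop limit liked num = liked := by
  rw [aLoop]; simp [h]

theorem bFold_noop (limit : Int) (nums : List Int) (liked : List Int)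
    (h : ¬ (liked.length : Int) < limit) : bFold limit nums liked = liked := by
  induction nums with
  | nil => rfl
  | cons n t ih => simp only [bFold, List.foldl_cons, bStep, if_neg h] at *; exact ih

theorem bFold_full (limit : Int) (nums : List Int) : ∀ liked : List Int,
    (liked.length : Int) + nums.length ≤ limit → bFold limit nums liked = liked ++ nums := by
  induction nums with
  | nil => intro liked _; simp [bFold]
  | cons n t ih =>
    intro liked h
    simp only [List.length_cons] at h
    have hg : (liked.length : Int) < limit := by push_cast at h ⊢; omega
    simp only [bFold, List.foldl_cons, bStep, if_pos hg]
    have := ih (liked ++ [n]) (by simp; push_cast at h ⊢; omega)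
    simpa [bFold, List.append_assoc] using this

theorem bFold_length (limit : Int) (nums : List Int) : ∀ liked : List Int,
    ((bFold limit nums liked).length : Int)
      = if (liked.length : Int) < limit then min limit ((liked.length : Int) + nums.length) else liked.length := by
  induction nums with
  | nil =>
    intro liked
    simp only [bFold, List.foldl_nil, List.length_nil, Nat.cast_zero, add_zero]
    split_ifs <;> omega
  | cons n t ih =>
    intro liked
    simp only [bFold, List.foldl_cons, List.length_cons]
    by_cases hg : (liked.length : Int) < limit
    · simp only [bStep, if_pos hg]
      have := ih (liked ++ [n])
      simp only [bFold] at this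
      rw [this]
      simp only [List.length_append, List.length_cons, List.length_nil]
      push_cast
      split_ifs <;> omega
    · simp only [bStep, if_neg hg]
      have := ih liked
      simp only [bFold] at this
      rw [this]
      simp [hg]

theorem aLoop_step (limit : Int) (liked : List Int) (num : Int) :
    aLoop limit liked num = aLoop limit (aStep limit liked num) (num + 1) := by
  by_cases h : (liked.length : Int) < limit
  · rw [aLoop]
    simp only [if_pos h, aStep]
    split_ifs <;> rfl
  · have hs : aStep limit liked num = liked := by simp [aStep, h]
    rw [hs, aLoop_stop limit liked num h, aLoop_stop limit liked (num + 1) h]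

theorem segList_succ (num : Int) (k : Nat) :
    segList num (k + 1) = num :: segList (num + 1) k := by
  unfold segList
  rw [List.range_succ_eq_map, List.map_cons, List.map_map]
  congr 1
  · norm_num
  · apply List.map_congr_left
    intro i _
    simp only [Function.comp]
    push_cast
    ring

theorem aLoop_seg (limit : Int) (k : Nat) : ∀ (liked : List Int) (num : Int),
    aLoop limit liked num = aLoop limit (aSeg limit (segList num k) liked) (num + (k : Int)) := by
  induction k with
  | zero => intro liked num; simp [segList, aSeg]
  | succ k ih =>
    intro liked num
    rw [segList_succ]
    simp only [aSeg, List.foldl_cons]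
    rw [aLoop_step limit liked num]
    have := ih (aStep limit liked num) (num + 1)
    simp only [aSeg] at this
    rw [this]
    congr 1
    push_cast
    ring

theorem aSeg_filter (limit : Int) (nums : List Int) : ∀ liked : List Int,
    aSeg limit nums liked = bFold limit (nums.filter (fun n => pvLiked n)) liked := by
  induction nums with
  | nil => intro liked; rfl
  | cons n t ih =>
    intro liked
    by_cases h : pvLiked n = true
    · simp only [aSeg, List.foldl_cons, List.filter_cons, h, if_pos]
      have : aStep limit liked n = bStep limit liked n := by
        simp [aStep, bStep, h]
      rw [this]
      exact ih (bStep limit liked n)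
    · have h' : pvLiked n = false := by simpa using h
      simp only [aSeg, List.foldl_cons, List.filter_cons, h']
      have : aStep limit liked n = liked := by
        simp [aStep, h']
      rw [this]
      simpa using ih liked

theorem pvLiked_shift (b n : Int) : pvLiked (30 * b + n) = pvLiked n := by
  unfold pvLiked
  rw [show (30 * b + n) % 3 = n % 3 by omega, show (30 * b + n) % 10 = n % 10 by omega]

theorem block_filter (b : Int) :
    (segList (30 * b + 1) 30).filter (fun n => pvLiked n)
      = pvOffsets.map (fun off => 30 * b + off) := by
  have h1 : segList (30 * b + 1) 30
      = (List.range 30).map (fun (i : Nat) => 30 * b + (1 + (i : Int))) := by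
    simp only [segList]
    apply List.map_congr_left
    intro i _
    ring
  rw [h1, List.filter_map]
  have h2 : (List.range 30).filter ((fun n => pvLiked n) ∘ (fun (i : Nat) => 30 * b + (1 + (i : Int))))
      = (List.range 30).filter (fun (i : Nat) => pvLiked (1 + (i : Int))) := by
    apply List.filter_congr
    intro i _
    simp [Function.comp, pvLiked_shift]
  rw [h2]
  have h3 : (List.range 30).filter (fun (i : Nat) => pvLiked (1 + (i : Int)))
      = [0, 1, 3, 4, 6, 7, 9, 10, 13, 15, 16, 18, 19, 21, 24, 25, 27, 28] := by decide
  rw [h3]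
  simp only [pvOffsets, List.map_cons, List.map_nil]
  norm_num

theorem pvTail_eq (limit base : Int) (liked : List Int) :
    pvTail limit base liked = bFold limit (pvOffsets.map (fun off => base + off)) liked := by
  simp [pvTail, bFold, List.foldl_map, bStep]

theorem main_lemma (limit : Int) : ∀ (m : Nat) (liked : List Int) (b : Int),
    (limit - liked.length).toNat ≤ m → aLoop limit liked (30 * b + 1) = bLoop limit liked b := by
  intro m
  induction m with
  | zero =>
    intro liked b hm
    have h : ¬ (liked.length : Int) < limit := by omega
    have h18 : ¬ (liked.length : Int) + 18 ≤ limit := by omega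
    rw [aLoop_stop limit liked _ h, bLoop]
    simp only [if_neg h18]
    rw [pvTail_eq, bFold_noop limit _ liked h]
  | succ m ih =>
    intro liked b hm
    have hblock : aLoop limit liked (30 * b + 1)
        = aLoop limit (bFold limit (pvOffsets.map (fun off => 30 * b + off)) liked) (30 * b + 1 + 30) := by
      have := aLoop_seg limit 30 liked (30 * b + 1)
      rw [this, aSeg_filter, block_filter]
      norm_num
    by_cases h18 : (liked.length : Int) + 18 ≤ limit
    · -- a full block fits: B appends it unguarded, A's guarded fold does the same
      have hlen : ((pvOffsets.map (fun off => 30 * b + off)).length : Int) = 18 := by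
        simp [pvOffsets]
      have hfull := bFold_full limit (pvOffsets.map (fun off => 30 * b + off)) liked
        (by rw [hlen] at *; omega)
      rw [bLoop]
      simp only [if_pos h18]
      rw [hblock, hfull]
      have hm' : (limit - ((liked ++ pvOffsets.map (fun off => 30 * b + off)).length : Int)).toNat ≤ m := by
        simp only [List.length_append]
        push_cast
        rw [show ((pvOffsets.map (fun off => 30 * b + off)).length : Int) = 18 from hlen] at *
        push_cast at hlen
        omega
      have := ih (liked ++ pvOffsets.map (fun off => 30 * b + off)) (b + 1) hm'
      rw [show 30 * b + 1 + 30 = 30 * (b + 1) + 1 by ring]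
      exact this
    · -- last (possibly partial) block: after it A's length reaches limit (or already had)
      rw [bLoop]
      simp only [if_neg h18]
      rw [pvTail_eq]
      by_cases hg : (liked.length : Int) < limit
      · rw [hblock]
        apply aLoop_stop
        have hlen := bFold_length limit (pvOffsets.map (fun off => 30 * b + off)) liked
        rw [if_pos hg] at hlen
        simp only [List.length_map, show pvOffsets.length = 18 from rfl] at hlen
        push_cast at hlen
        omega
      · rw [aLoop_stop limit liked _ hg, bFold_noop limit _ liked hg]

-- ===== VERDICT (by name: the statement is the Claim_ definition above) =====
theorem generate_liked_numbers_spec : Claim_equal_generate_liked_numbers := by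
  intro limit _
  unfold Spec_generate_liked_numbers generate_liked_numbers generate_liked_numbers_alt
  have := main_lemma limit (limit - ([] : List Int).length).toNat [] 0 (le_refl _)
  simpa using this
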